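-- pv_equiv track=rewrite | github.com/AnnaGrBio/DESWOMAN | module_transcripts_data_and_threeshold.py | assess_te
-- ===== SOURCE A (Python) =====
-- def assess_te(fasta_seq):
--     presence = False
--     list_elts = ["a", "t", "c", "g", "n"]
--     for nucl in fasta_seq:
--         if nucl in list_elts:
--             presence = True
--             break
--     return presence
-- ===== SOURCE B (Python) =====
-- def assess_te(fasta_seq):
--     # Inverted iteration: search the whole sequence once per nucleotide letter,
--     # instead of scanning the sequence element-wise with an early break.
--     return any(c in fasta_seq for c in "atcgn")
-- ===== Notes on version B (the rewrite author's own statement) =====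
-- stated objective: idiomatic
-- what changed: Inverts the loops: instead of scanning the sequence element-wise with an early break against a nucleotide list, B iterates over the five nucleotide letters and runs a substring search over the whole sequence for each.
import Mathlib
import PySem

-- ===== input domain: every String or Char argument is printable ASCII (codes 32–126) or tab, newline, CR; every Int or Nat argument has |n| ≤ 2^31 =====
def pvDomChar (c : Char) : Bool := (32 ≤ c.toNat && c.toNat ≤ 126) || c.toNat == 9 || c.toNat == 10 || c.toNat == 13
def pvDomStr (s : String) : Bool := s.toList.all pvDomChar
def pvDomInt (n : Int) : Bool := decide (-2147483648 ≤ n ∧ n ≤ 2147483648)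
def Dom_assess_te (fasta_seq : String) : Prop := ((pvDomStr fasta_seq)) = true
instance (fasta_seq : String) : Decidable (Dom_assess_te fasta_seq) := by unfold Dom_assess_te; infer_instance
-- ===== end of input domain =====

-- B inverts the iteration: it loops over the five nucleotide letters and runs a substring
-- search over the whole sequence for each, instead of A's element-wise scan with an early break.

-- ===== PORT A =====
-- the for-loop with 'presence = True; break': returns true at the first nucleotide hit
def assessLoop (list_elts : List Char) : List Char → Bool
  | [] => false
  | nucl :: rest => if list_elts.contains nucl then true else assessLoop list_elts rest

def assess_te (fasta_seq : String) : Bool :=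
  assessLoop ['a', 't', 'c', 'g', 'n'] fasta_seq.toList

-- ===== PORT B =====
-- any(c in fasta_seq for c in "atcgn"): per-letter substring search
def assess_te_alt (fasta_seq : String) : Bool :=
  (["a", "t", "c", "g", "n"] : List String).any (fun c => PySem.Str.isIn c fasta_seq)

-- ===== PRECONDITION & SPEC =====
def Spec_assess_te (fasta_seq : String) (out : Bool) : Prop := out = assess_te_alt fasta_seq
instance (fasta_seq : String) (out : Bool) : Decidable (Spec_assess_te fasta_seq out) := by unfold Spec_assess_te; infer_instance

-- ===== CLAIM =====
def Claim_equal_assess_te : Prop := ∀ (fasta_seq : String), Dom_assess_te fasta_seq → Spec_assess_te fasta_seq (assess_te fasta_seq)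

-- ===== LEMMAS AND PROOFS =====
theorem singleton_infix_iff_mem {α : Type} (c : α) (l : List α) : [c] <:+: l ↔ c ∈ l := by
  constructor
  · intro h
    exact (List.singleton_sublist).mp h.sublist
  · intro h
    obtain ⟨s, t, rfl⟩ := List.append_of_mem h
    exact ⟨s, t, by simp⟩

theorem assessLoop_eq_any (es l : List Char) :
    assessLoop es l = l.any (fun c => es.contains c) := by
  induction l with
  | nil => rfl
  | cons c rest ih =>
      simp only [assessLoop, List.any_cons]
      by_cases h : es.contains c <;> simp [h] <;> simp only [List.contains_eq_mem] at ih ⊢ <;> rw [ih]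

theorem alt_eq_any (s : String) :
    assess_te_alt s = s.toList.any (fun c => (['a','t','c','g','n'] : List Char).contains c) := by
  rw [Bool.eq_iff_iff]
  unfold assess_te_alt
  simp only [List.any_eq_true, PySem.Str.isIn_iff_infix, List.contains_eq_mem, decide_eq_true_eq]
  constructor
  · rintro ⟨p, hp, hinf⟩
    fin_cases hp <;>
      exact ⟨_, (singleton_infix_iff_mem _ _).mp hinf, by decide⟩
  · rintro ⟨c, hc, hmem⟩
    fin_cases hmem
    · exact ⟨"a", by simp, by rw [show ("a":String).toList = ['a'] by decide]; exact (singleton_infix_iff_mem 'a' s.toList).mpr hc⟩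
    · exact ⟨"t", by simp, by rw [show ("t":String).toList = ['t'] by decide]; exact (singleton_infix_iff_mem 't' s.toList).mpr hc⟩
    · exact ⟨"c", by simp, by rw [show ("c":String).toList = ['c'] by decide]; exact (singleton_infix_iff_mem 'c' s.toList).mpr hc⟩
    · exact ⟨"g", by simp, by rw [show ("g":String).toList = ['g'] by decide]; exact (singleton_infix_iff_mem 'g' s.toList).mpr hc⟩
    · exact ⟨"n", by simp, by rw [show ("n":String).toList = ['n'] by decide]; exact (singleton_infix_iff_mem 'n' s.toList).mpr hc⟩

-- ===== VERDICT =====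
theorem assess_te_spec : Claim_equal_assess_te := by
  intro s _
  unfold Spec_assess_te
  rw [assess_te, assessLoop_eq_any, alt_eq_any]
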